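-- pv_equiv track=rewrite | github.com/nbajpai-code/nbajpai-code | update_profile.py | generate_repo_cards
-- ===== SOURCE A (Python) =====
-- def generate_repo_cards(repos, max_cards=6):
--     """Generate repository cards for the README."""
--     cards = []
--     for repo in repos[:max_cards]:
--         card = f"[![Repo Card](https://github-readme-stats.vercel.app/api/pin/?username=nbajpai-code&repo={repo['name']}&theme=tokyonight&hide_border=true)](https://github.com/nbajpai-code/{repo['name']})"
--         cards.append(card)
--
--     # Arrange in rows of 2
--     result = []
--     for i in range(0, len(cards), 2):
--         if i + 1 < len(cards):
--             result.append(f"{cards[i]}\n{cards[i+1]}")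
--         else:
--             result.append(cards[i])
--
--     return "\n\n".join(result)
-- ===== SOURCE B (Python) =====
-- CARD = ("[![Repo Card](https://github-readme-stats.vercel.app/api/pin/"
--         "?username=nbajpai-code&repo={0}&theme=tokyonight&hide_border=true)]"
--         "(https://github.com/nbajpai-code/{0})")
--
--
-- def generate_repo_cards(repos, max_cards=6):
--     """Single pass: emit each card, preceded by '\n' (odd index, same row)
--     or '\n\n' (even index, new row) — no explicit row grouping."""
--     out = ""
--     for i, repo in enumerate(repos[:max_cards]):
--         if i > 0:
--             out += "\n" if i % 2 else "\n\n"
--         out += CARD.format(repo['name'])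
--     return out
-- ===== Notes on version B (the rewrite author's own statement) =====
-- stated objective: simpler
-- what changed: Replaces A's two-phase structure (build card list, pair indices via range(0,n,2) into row strings, '\n\n'.join) with one enumerate pass that appends each card after a parity-chosen separator ('\n' at odd indices, '\n\n' at even ones).
import Mathlib
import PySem

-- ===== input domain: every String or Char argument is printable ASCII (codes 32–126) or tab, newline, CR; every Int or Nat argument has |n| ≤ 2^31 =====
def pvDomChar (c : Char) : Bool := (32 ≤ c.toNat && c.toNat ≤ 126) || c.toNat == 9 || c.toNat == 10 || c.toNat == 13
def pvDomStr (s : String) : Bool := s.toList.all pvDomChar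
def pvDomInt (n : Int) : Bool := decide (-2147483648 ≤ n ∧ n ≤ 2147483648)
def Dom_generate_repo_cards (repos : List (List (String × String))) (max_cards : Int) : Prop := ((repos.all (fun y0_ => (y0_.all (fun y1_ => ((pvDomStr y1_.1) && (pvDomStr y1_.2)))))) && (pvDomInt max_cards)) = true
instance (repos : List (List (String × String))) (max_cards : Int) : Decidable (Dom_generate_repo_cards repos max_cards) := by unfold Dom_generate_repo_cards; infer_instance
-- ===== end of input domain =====

-- B replaces A's two-phase "build card list, pair it up with range(0,n,2), join rows
-- with '\n\n'" by a single enumerate pass emitting a parity-chosen separator before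
-- each card (objective: simpler).

-- ===== PORT A =====
-- repo['name'] (dict → association list, first match); Pre_ excludes a missing 'name' key (KeyError)
def pvNameA (repo : List (String × String)) : String :=
  (((repo.find? (fun p => p.1 == "name")).map (fun p => p.2)).getD "")

def pvCardA (repo : List (String × String)) : String :=
  "[![Repo Card](https://github-readme-stats.vercel.app/api/pin/?username=nbajpai-code&repo="
    ++ pvNameA repo
    ++ "&theme=tokyonight&hide_border=true)](https://github.com/nbajpai-code/"
    ++ pvNameA repo ++ ")"

def generate_repo_cards (repos : List (List (String × String))) (max_cards : Int) : String :=
  let cards : List String :=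
    (PySem.List.slice repos none (some max_cards)).foldl (fun acc repo => acc ++ [pvCardA repo]) []
  let result : List String :=
    (PySem.List.pyRange 0 (cards.length : Int) 2).foldl
      (fun res i =>
        if i + 1 < (cards.length : Int) then
          res ++ [PySem.List.pyGetD cards i "" ++ "\n" ++ PySem.List.pyGetD cards (i + 1) ""]
        else
          res ++ [PySem.List.pyGetD cards i ""]) []
  PySem.Str.join "\n\n" result

-- ===== PORT B =====
-- CARD.format(repo['name']) from Source B: the name is looked up once and inserted twice
def pvCardB (repo : List (String × String)) : String :=
  let n := (((repo.find? (fun p => p.1 == "name")).map (fun p => p.2)).getD "")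
  "[![Repo Card](https://github-readme-stats.vercel.app/api/pin/?username=nbajpai-code&repo="
    ++ n
    ++ "&theme=tokyonight&hide_border=true)](https://github.com/nbajpai-code/"
    ++ n ++ ")"

def generate_repo_cards_alt (repos : List (List (String × String))) (max_cards : Int) : String :=
  (PySem.List.enumerate (PySem.List.slice repos none (some max_cards)) 0).foldl
    (fun out p =>
      (if 0 < p.1 then out ++ (if PySem.Int.mod p.1 2 ≠ 0 then "\n" else "\n\n") else out)
        ++ pvCardB p.2)
    ""

-- ===== PRECONDITION & SPEC =====
-- Pre_ excludes exactly the inputs where Python A raises KeyError: a repo among the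
-- first max_cards that has no 'name' key (B raises there too).
def Pre_generate_repo_cards (repos : List (List (String × String))) (max_cards : Int) : Prop :=
  ∀ r ∈ PySem.List.slice repos none (some max_cards), r.any (fun p => p.1 == "name") = true

instance (repos : List (List (String × String))) (max_cards : Int) : Decidable (Pre_generate_repo_cards repos max_cards) := by unfold Pre_generate_repo_cards; infer_instance

def pvWitness_generate_repo_cards : (List (List (String × String))) × Int :=
  ([[("name", "dotfiles")], [("name", "scripts"), ("desc", "misc")], [("name", "site")]], 6)

def Spec_generate_repo_cards (repos : List (List (String × String))) (max_cards : Int) (out : String) : Prop := out = generate_repo_cards_alt repos max_cards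
instance (repos : List (List (String × String))) (max_cards : Int) (out : String) : Decidable (Spec_generate_repo_cards repos max_cards out) := by unfold Spec_generate_repo_cards; infer_instance

-- ===== CLAIM (what is proved, stated in full; the proofs are below) =====
def Claim_equal_generate_repo_cards : Prop := ∀ (repos : List (List (String × String))) (max_cards : Int), Dom_generate_repo_cards repos max_cards → Pre_generate_repo_cards repos max_cards → Spec_generate_repo_cards repos max_cards (generate_repo_cards repos max_cards)

-- ===== LEMMAS AND PROOFS =====

-- the rows A builds: pairs of consecutive cards joined by '\n'
def pvRows : List String → List String
  | [] => []
  | [a] => [a]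
  | a :: b :: t => (a ++ "\n" ++ b) :: pvRows t

-- the string B appends after the first full row, card list tail two at a time
def pvTail : List (List (String × String)) → String
  | [] => ""
  | [r] => "\n\n" ++ pvCardA r
  | r :: s :: t => "\n\n" ++ pvCardA r ++ "\n" ++ pvCardA s ++ pvTail t

-- the whole output as a function of the sliced repo list
def pvFront : List (List (String × String)) → String
  | [] => ""
  | [r] => pvCardA r
  | r :: s :: t => pvCardA r ++ "\n" ++ pvCardA s ++ pvTail t

theorem pvCardB_eq (r : List (String × String)) : pvCardB r = pvCardA r := rfl

theorem pvRange_two_cons (a b : Int) (h : a < b) :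
    PySem.List.pyRange a b 2 = a :: PySem.List.pyRange (a + 2) b 2 := by
  rw [PySem.List.pyRange_of_pos a b (by norm_num),
      PySem.List.pyRange_of_pos (a + 2) b (by norm_num)]
  by_cases h2 : a + 2 < b
  · simp only [if_pos h, if_pos h2]
    have hn : ((b - a + 2 - 1) / 2).toNat = ((b - (a + 2) + 2 - 1) / 2).toNat + 1 := by omega
    rw [hn, List.range_succ_eq_map, List.map_cons, List.map_map]
    refine List.cons_eq_cons.mpr ⟨by norm_num, ?_⟩
    refine List.map_congr_left (fun k _ => ?_)
    simp only [Function.comp_apply]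
    push_cast
    ring
  · simp only [if_pos h, if_neg h2]
    have : ((b - a + 2 - 1) / 2).toNat = 1 := by omega
    rw [this]
    simp [List.range_one]

theorem pvRange_two_nil (a b : Int) (h : b ≤ a) : PySem.List.pyRange a b 2 = [] := by
  rw [PySem.List.pyRange_of_pos a b (by norm_num), if_neg (by omega)]
  simp

-- A's pairing loop over range(0, len(cards), 2) produces pvRows
theorem pvA_rows (cards : List String) : ∀ (rest : List String) (j : Nat) (acc : List String),
    cards.drop j = rest →
    (PySem.List.pyRange (j : Int) (cards.length : Int) 2).foldl
      (fun res i =>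
        if i + 1 < (cards.length : Int) then
          res ++ [PySem.List.pyGetD cards i "" ++ "\n" ++ PySem.List.pyGetD cards (i + 1) ""]
        else
          res ++ [PySem.List.pyGetD cards i ""]) acc
    = acc ++ pvRows rest := by
  intro rest
  induction rest using pvRows.induct with
  | case1 =>
    intro j acc h
    have hj : cards.length ≤ j := List.drop_eq_nil_iff.mp h
    rw [pvRange_two_nil _ _ (by exact_mod_cast hj)]
    simp [pvRows]
  | case2 a =>
    intro j acc h
    have hlen : cards.length = j + 1 := by
      have := congrArg List.length h
      simp at this; omega
    have hj : (j : Int) < (cards.length : Int) := by exact_mod_cast (by omega : j < cards.length)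
    rw [pvRange_two_cons _ _ hj, List.foldl_cons,
        pvRange_two_nil _ _ (by omega)]
    have hcond : ¬ ((j : Int) + 1 < (cards.length : Int)) := by omega
    rw [if_neg hcond]
    have hja : PySem.List.pyGetD cards (j : Int) "" = a := by
      rw [PySem.List.pyGetD_natCast, List.getD_eq_getElem?_getD]
      have h0 : cards[j]? = some a := by
        have h1 : (cards.drop j)[0]? = cards[j + 0]? := List.getElem?_drop
        rw [h] at h1
        simpa using h1.symm
      rw [h0]
      rfl
    simp [pvRows, hja]
  | case3 a b t ih =>
    intro j acc h
    have hlen : cards.length = j + 2 + t.length := by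
      have := congrArg List.length h
      simp at this; omega
    have hj : (j : Int) < (cards.length : Int) := by exact_mod_cast (by omega : j < cards.length)
    rw [pvRange_two_cons _ _ hj, List.foldl_cons]
    have hcond : ((j : Int) + 1 < (cards.length : Int)) := by omega
    rw [if_pos hcond]
    have hja : PySem.List.pyGetD cards (j : Int) "" = a := by
      rw [PySem.List.pyGetD_natCast, List.getD_eq_getElem?_getD]
      have h0 : cards[j]? = some a := by
        have h1 : (cards.drop j)[0]? = cards[j + 0]? := List.getElem?_drop
        rw [h] at h1
        simpa using h1.symm
      rw [h0]
      rfl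
    have hjb : PySem.List.pyGetD cards ((j : Int) + 1) "" = b := by
      have hcast : (j : Int) + 1 = ((j + 1 : Nat) : Int) := by omega
      rw [hcast, PySem.List.pyGetD_natCast, List.getD_eq_getElem?_getD]
      have h0 : cards[j + 1]? = some b := by
        have h1 : (cards.drop j)[1]? = cards[j + 1]? := List.getElem?_drop
        rw [h] at h1
        simpa using h1.symm
      rw [h0]
      rfl
    have hdrop : cards.drop (j + 2) = t := by
      have : List.drop 2 (cards.drop j) = List.drop 2 (a :: b :: t) := by rw [h]
      rw [List.drop_drop] at this
      simpa using this
    have hcast2 : (j : Int) + 2 = ((j + 2 : Nat) : Int) := by omega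
    rw [hja, hjb, hcast2, ih (j + 2) _ hdrop]
    simp [pvRows]

-- joining pvRows of the mapped cards with '\n\n' gives pvFront
theorem pvJoin_rows (sl : List (List (String × String))) :
    PySem.Str.join "\n\n" (pvRows (sl.map pvCardA)) = pvFront sl := by
  induction sl using pvTail.induct with
  | case1 =>
    apply String.toList_inj.mp
    simp [pvRows, pvFront, PySem.Str.toList_join, PySem.Chars.join_nil]
  | case2 r =>
    apply String.toList_inj.mp
    simp [pvRows, pvFront, PySem.Str.toList_join, PySem.Chars.join_singleton]
  | case3 r s t ih =>
    cases t with
    | nil =>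
      apply String.toList_inj.mp
      simp [pvRows, pvFront, pvTail, PySem.Str.toList_join, PySem.Chars.join_singleton,
            String.append_empty]
    | cons u t2 =>
      apply String.toList_inj.mp
      have hne : pvRows ((u :: t2).map pvCardA) ≠ [] := by
        cases t2 with
        | nil => simp [pvRows]
        | cons v t3 => simp [pvRows]
      obtain ⟨q, qs, hq⟩ : ∃ q qs, pvRows ((u :: t2).map pvCardA) = q :: qs := by
        cases hqq : pvRows ((u :: t2).map pvCardA) with
        | nil => exact absurd hqq hne
        | cons q qs => exact ⟨q, qs, rfl⟩
      have hAll : pvRows ((r :: s :: u :: t2).map pvCardA)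
          = (pvCardA r ++ "\n" ++ pvCardA s) :: pvRows ((u :: t2).map pvCardA) := by
        simp [pvRows]
      rw [hAll, hq]
      have hIH := congrArg String.toList ih
      rw [hq] at hIH
      simp [PySem.Str.toList_join, PySem.Chars.join_cons_cons] at hIH ⊢
      rw [hIH]
      have hT : pvTail (u :: t2) = "\n\n" ++ pvFront (u :: t2) := by
        cases t2 with
        | nil => simp [pvTail, pvFront]
        | cons v t3 => simp [pvTail, pvFront, String.append_assoc]
      have := congrArg String.toList hT
      simp at this
      simp [pvFront, this]

-- B's fold from an even start index ≥ 2 appends pvTail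
theorem pvB_tail : ∀ (t : List (List (String × String))) (k : Nat) (out : String),
    (PySem.List.enumerate t (2 * (k : Int) + 2)).foldl
      (fun out p =>
        (if 0 < p.1 then out ++ (if PySem.Int.mod p.1 2 ≠ 0 then "\n" else "\n\n") else out)
          ++ pvCardB p.2) out
    = out ++ pvTail t := by
  intro t
  induction t using pvTail.induct with
  | case1 => intro k out; simp [PySem.List.enumerate, pvTail, String.append_empty]
  | case2 r =>
    intro k out
    have hp : (0 : Int) < 2 * (k : Int) + 2 := by positivity
    simp [PySem.List.enumerate, pvTail, pvCardB_eq, hp, String.append_assoc]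
  | case3 r s t2 ih =>
    intro k out
    have hp1 : (0 : Int) < 2 * (k : Int) + 2 := by positivity
    have hp2 : (0 : Int) < 2 * (k : Int) + 2 + 1 := by positivity
    have hstep : 2 * (k : Int) + 2 + 1 + 1 = 2 * ((k + 1 : Nat) : Int) + 2 := by push_cast; ring
    rw [PySem.List.enumerate_cons, List.foldl_cons, PySem.List.enumerate_cons, List.foldl_cons,
        hstep]
    simp only [if_pos hp1, if_pos hp2]
    rw [if_neg (by simp), if_pos (by simp; omega), ih (k + 1)]
    simp [pvTail, pvCardB_eq, String.append_assoc]

-- B's whole fold computes pvFront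
theorem pvB_front (sl : List (List (String × String))) :
    (PySem.List.enumerate sl 0).foldl
      (fun out p =>
        (if 0 < p.1 then out ++ (if PySem.Int.mod p.1 2 ≠ 0 then "\n" else "\n\n") else out)
          ++ pvCardB p.2) ""
    = pvFront sl := by
  cases sl with
  | nil => simp [PySem.List.enumerate, pvFront]
  | cons r t =>
    cases t with
    | nil =>
      rw [PySem.List.enumerate_cons, List.foldl_cons]
      simp [PySem.List.enumerate, pvFront, pvCardB_eq, String.empty_append]
    | cons s t2 =>
      rw [PySem.List.enumerate_cons, List.foldl_cons, PySem.List.enumerate_cons, List.foldl_cons]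
      have hstep : (0 : Int) + 1 + 1 = 2 * ((0 : Nat) : Int) + 2 := by norm_num
      rw [hstep]
      simp only [if_neg (by norm_num : ¬ ((0:Int) < (0:Int))), if_pos (by norm_num : (0:Int) < 0 + 1)]
      rw [if_pos (by simp), pvB_tail t2 0]
      simp [pvFront, pvCardB_eq, String.empty_append, String.append_assoc]

-- ===== VERDICT (by name: the statement is the Claim_ definition above) =====
theorem generate_repo_cards_spec : Claim_equal_generate_repo_cards := by
  intro repos max_cards _hdom _hpre
  show generate_repo_cards repos max_cards = generate_repo_cards_alt repos max_cards
  have hA := pvA_rows (List.map pvCardA (PySem.List.slice repos none (some max_cards)))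
      (List.map pvCardA (PySem.List.slice repos none (some max_cards))) 0 [] (by simp)
  norm_cast at hA
  unfold generate_repo_cards generate_repo_cards_alt
  simp only [PySem.List.foldl_append_singleton_eq_map, List.nil_append]
  rw [hA, pvB_front]
  simpa using pvJoin_rows (PySem.List.slice repos none (some max_cards))
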